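-- pv_equiv track=rewrite | github.com/pypi-data/pypi-mirror-404 | packages/holoviz-mcp/holoviz_mcp-0.14.4.tar.gz/holoviz_mcp-0.14.4/src/holoviz_mcp/holoviz_mcp/data.py | _extract_description_from_markdown
-- ===== SOURCE A (Python) =====
-- def _extract_description_from_markdown(content: str, max_length=200) -> str:
--     """Extract description from markdown content."""
--     content = content.strip()
--
--     # Plotly documents start with --- ... --- section. Skip the section
--     if content.startswith("---"):
--         content = content.split("---", 2)[-1].strip()
--
--     lines = content.split("\n")
--     clean_lines = []
--     in_code_block = False
--
--     for line in lines:
--         if line.strip().startswith("```"):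
--             in_code_block = not in_code_block
--             continue
--
--         if in_code_block or line.startswith(("#", "    ", "\t", "---", "___")):
--             continue
--
--         clean_lines.append(line)
--
--     # Join lines and clean up
--     clean_content = "\n".join(clean_lines).strip()
--
--     # Remove extra whitespace and limit length
--     clean_content = " ".join(clean_content.split())
--
--     if len(clean_content) > max_length:
--         clean_content = clean_content[:max_length].rsplit(" ", 1)[0]
--     if not clean_content.endswith("."):
--         clean_content += " ..."
--
--     return clean_content
-- ===== SOURCE B (Python) =====
-- def _fences_split(lines):
--     """Partition lines into segments delimited by ``` fence lines (fences dropped)."""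
--     segs, cur = [], []
--     for ln in lines:
--         if ln.strip().startswith("```"):
--             segs.append(cur)
--             cur = []
--         else:
--             cur.append(ln)
--     segs.append(cur)
--     return segs
--
--
-- def _evens(xs):
--     """Every second element of xs, starting with the first."""
--     if not xs:
--         return []
--     return [xs[0]] + _evens(xs[2:])
--
--
-- def _finalize(kept_lines, max_length):
--     clean = " ".join("\n".join(kept_lines).strip().split())
--     if len(clean) > max_length:
--         clean = clean[:max_length].rsplit(" ", 1)[0]
--     if not clean.endswith("."):
--         clean += " ..."
--     return clean
--
--
-- def _extract_description_from_markdown(content: str, max_length=200) -> str: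
--     content = content.strip()
--     if content.startswith("---"):
--         content = content.split("---", 2)[-1].strip()
--     segments = _fences_split(content.split("\n"))
--     visible = [ln for seg in _evens(segments) for ln in seg]
--     kept = [ln for ln in visible if not ln.startswith(("#", "    ", "\t", "---", "___"))]
--     return _finalize(kept, max_length)
-- ===== Notes on version B (the rewrite author's own statement) =====
-- stated objective: alternative
-- what changed: Replaces A's in_code_block running-toggle loop (which interleaves fence tracking, code-block skipping and line filtering in one stateful pass with an accumulator) by an explicit partition of the lines into fence-delimited segments, selection of the even-indexed segments, and comprehension-style flattening and filtering of the visible lines, with the join/whitespace-collapse/truncate tail factored into a helper.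
import Mathlib
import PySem

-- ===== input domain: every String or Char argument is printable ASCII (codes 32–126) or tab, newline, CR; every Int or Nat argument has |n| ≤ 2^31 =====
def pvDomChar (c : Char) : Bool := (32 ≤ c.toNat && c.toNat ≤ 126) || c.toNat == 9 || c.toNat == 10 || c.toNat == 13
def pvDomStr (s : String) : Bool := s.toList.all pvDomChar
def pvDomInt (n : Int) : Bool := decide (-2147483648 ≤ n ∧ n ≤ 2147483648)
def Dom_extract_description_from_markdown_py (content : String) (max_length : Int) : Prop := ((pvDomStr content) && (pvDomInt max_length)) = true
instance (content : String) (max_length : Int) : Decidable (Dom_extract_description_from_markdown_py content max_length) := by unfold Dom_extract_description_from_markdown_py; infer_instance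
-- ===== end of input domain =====

-- B replaces A's in_code_block toggle loop with an explicit partition of the lines into
-- fence-delimited segments (keeping the even-indexed ones) followed by comprehension-style
-- filtering; objective: alternative decomposition, same cost.

-- ===== PORT A =====
-- line.strip().startswith("```")  (same Python expression in both programs)
def pvFence (line : String) : Bool := PySem.Str.startswith (PySem.Str.strip line) "```"

-- line.startswith(("#", "    ", "\t", "---", "___"))  (same Python expression in both programs)
def pvSkip (line : String) : Bool :=
  PySem.Str.startswith line "#" || PySem.Str.startswith line "    " ||
  PySem.Str.startswith line "\t" || PySem.Str.startswith line "---" ||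
  PySem.Str.startswith line "___"

-- exact port of s.rsplit(" ", 1)[0]: the prefix before the LAST ' ', or all of s when there is none
def pvRsplitHead (s : String) : String :=
  let i := PySem.Str.rfind s " "
  if i == -1 then s else PySem.Str.slice s none (some i)

def extract_description_from_markdown_py (content : String) (max_length : Int) : String :=
  let content := PySem.Str.strip content
  -- content.split("---", 2)[-1]: the split list is never empty and "---" ≠ "", so both getD defaults are unreachable
  let content := if PySem.Str.startswith content "---" then
      PySem.Str.strip ((PySem.List.pyGet? ((PySem.Str.splitMax? content "---" 2).getD []) (-1)).getD "")
    else content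
  let lines := (PySem.Str.split? content "\n").getD []   -- sep "\n" ≠ "", always some
  let st := lines.foldl (fun (st : Bool × List String) line =>
      if pvFence line then (!st.1, st.2)
      else if st.1 || pvSkip line then st
      else (st.1, st.2 ++ [line])) (false, ([] : List String))
  let clean := PySem.Str.join " " (PySem.Str.split₀ (PySem.Str.strip (PySem.Str.join "\n" st.2)))
  let clean := if max_length < PySem.Str.len clean then
      pvRsplitHead (PySem.Str.slice clean none (some max_length))
    else clean
  if PySem.Str.endswith clean "." then clean else clean ++ " ..."

-- ===== PORT B =====
-- _fences_split: partition lines into segments delimited by fence lines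
def fencesSplit_alt (lines : List String) : List (List String) :=
  let st := lines.foldl (fun (st : List (List String) × List String) ln =>
      if pvFence ln then (st.1 ++ [st.2], ([] : List String))
      else (st.1, st.2 ++ [ln])) (([] : List (List String)), ([] : List String))
  st.1 ++ [st.2]

-- _evens: every second element, starting with the first; xs[2:] on the nonempty xs = x :: rest
-- is rest.drop 1 (exact: PySem.List.slice_from_natCast)
def evens_alt : List (List String) → List (List String)
  | [] => []
  | x :: rest => [x] ++ evens_alt (rest.drop 1)
termination_by xs => xs.length

-- _finalize: join / collapse whitespace / truncate / '...'
def finalize_alt (kept : List String) (max_length : Int) : String :=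
  let clean := PySem.Str.join " " (PySem.Str.split₀ (PySem.Str.strip (PySem.Str.join "\n" kept)))
  let clean := if max_length < PySem.Str.len clean then
      pvRsplitHead (PySem.Str.slice clean none (some max_length))
    else clean
  if PySem.Str.endswith clean "." then clean else clean ++ " ..."

def extract_description_from_markdown_py_alt (content : String) (max_length : Int) : String :=
  let content := PySem.Str.strip content
  let content := if PySem.Str.startswith content "---" then
      PySem.Str.strip ((PySem.List.pyGet? ((PySem.Str.splitMax? content "---" 2).getD []) (-1)).getD "")
    else content
  let segments := fencesSplit_alt ((PySem.Str.split? content "\n").getD [])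
  let visible := (evens_alt segments).flatMap (fun seg => seg)
  let kept := visible.filter (fun ln => !pvSkip ln)
  finalize_alt kept max_length

-- ===== PRECONDITION & SPEC =====
def Spec_extract_description_from_markdown_py (content : String) (max_length : Int) (out : String) : Prop := out = extract_description_from_markdown_py_alt content max_length
instance (content : String) (max_length : Int) (out : String) : Decidable (Spec_extract_description_from_markdown_py content max_length out) := by unfold Spec_extract_description_from_markdown_py; infer_instance

-- ===== CLAIM (what is proved, stated in full; the proofs are below) =====
def Claim_equal_extract_description_from_markdown_py : Prop := ∀ (content : String) (max_length : Int), Dom_extract_description_from_markdown_py content max_length → Spec_extract_description_from_markdown_py content max_length (extract_description_from_markdown_py content max_length)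

-- ===== LEMMAS AND PROOFS =====

-- the lines A's toggle loop keeps, as a recursive specification
def keepSpec : Bool → List String → List String
  | _, [] => []
  | b, l :: ls =>
    if pvFence l then keepSpec (!b) ls
    else if b || pvSkip l then keepSpec b ls
    else l :: keepSpec b ls

theorem loopA_eq_keepSpec (ls : List String) (b : Bool) (acc : List String) :
    (ls.foldl (fun (st : Bool × List String) line =>
      if pvFence line then (!st.1, st.2)
      else if st.1 || pvSkip line then st
      else (st.1, st.2 ++ [line])) (b, acc)).2 = acc ++ keepSpec b ls := by
  induction ls generalizing b acc with
  | nil => simp [keepSpec]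
  | cons l ls ih =>
    simp only [List.foldl_cons, keepSpec]
    by_cases hf : pvFence l = true
    · rw [if_pos hf, if_pos hf]
      exact ih (!b) acc
    · by_cases hb : (b || pvSkip l) = true
      · rw [if_neg hf, if_neg hf, if_pos hb, if_pos hb]
        exact ih b acc
      · rw [if_neg hf, if_neg hf, if_neg hb, if_neg hb]
        rw [ih b (acc ++ [l])]
        simp

-- the segments of B's partition, as a recursive specification
def consHead (l : String) : List (List String) → List (List String)
  | [] => [[l]]
  | s :: r => (l :: s) :: r

def segList : List String → List (List String)
  | [] => [[]]
  | l :: ls => if pvFence l then [] :: segList ls else consHead l (segList ls)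

theorem segList_ne_nil (ls : List String) : segList ls ≠ [] := by
  cases ls with
  | nil => simp [segList]
  | cons l ls =>
    simp only [segList]
    split
    · simp
    · cases h : segList ls <;> simp [consHead]

def appendHead (cur : List String) : List (List String) → List (List String)
  | [] => [cur]
  | s :: r => (cur ++ s) :: r

theorem loopB_eq_segList (ls : List String) (segs : List (List String)) (cur : List String) :
    (ls.foldl (fun (st : List (List String) × List String) ln =>
        if pvFence ln then (st.1 ++ [st.2], ([] : List String))
        else (st.1, st.2 ++ [ln])) (segs, cur)).1
      ++ [(ls.foldl (fun (st : List (List String) × List String) ln =>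
        if pvFence ln then (st.1 ++ [st.2], ([] : List String))
        else (st.1, st.2 ++ [ln])) (segs, cur)).2]
    = segs ++ appendHead cur (segList ls) := by
  induction ls generalizing segs cur with
  | nil => simp [segList, appendHead]
  | cons l ls ih =>
    simp only [List.foldl_cons, segList]
    by_cases hf : pvFence l = true
    · rw [if_pos hf, if_pos hf, ih]
      obtain ⟨s, r, hs⟩ := List.exists_cons_of_ne_nil (segList_ne_nil ls)
      simp [hs, appendHead]
    · rw [if_neg hf, if_neg hf, ih]
      obtain ⟨s, r, hs⟩ := List.exists_cons_of_ne_nil (segList_ne_nil ls)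
      simp [hs, appendHead, consHead]

theorem fencesSplit_eq_segList (ls : List String) : fencesSplit_alt ls = segList ls := by
  have h := loopB_eq_segList ls [] []
  obtain ⟨s, r, hs⟩ := List.exists_cons_of_ne_nil (segList_ne_nil ls)
  unfold fencesSplit_alt
  rw [h, hs]
  simp [appendHead]

-- the visible-and-kept lines of a segment list
def keptOf (xs : List (List String)) : List String :=
  (xs.flatMap (fun seg => seg)).filter (fun ln => !pvSkip ln)

theorem keptOf_cons (s : List String) (r : List (List String)) :
    keptOf (s :: r) = s.filter (fun ln => !pvSkip ln) ++ keptOf r := by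
  simp [keptOf]

theorem evens_alt_cons (x : List String) (rest : List (List String)) :
    evens_alt (x :: rest) = [x] ++ evens_alt (rest.drop 1) := by
  simp [evens_alt]

theorem evens_keepSpec (ls : List String) :
    keptOf (evens_alt (segList ls)) = keepSpec false ls
    ∧ keptOf (evens_alt ((segList ls).drop 1)) = keepSpec true ls := by
  induction ls with
  | nil => constructor <;> simp [segList, evens_alt, keptOf, keepSpec]
  | cons l ls ih =>
    obtain ⟨s, r, hs⟩ := List.exists_cons_of_ne_nil (segList_ne_nil ls)
    have h1 := ih.1
    have h2 := ih.2
    rw [hs, evens_alt_cons, List.singleton_append, keptOf_cons] at h1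
    rw [hs] at h2
    simp only [List.drop_succ_cons, List.drop_zero] at h2
    -- h1 : s.filter (!pvSkip ·) ++ keptOf (evens_alt ((s :: r).drop 1)) = keepSpec false ls
    -- h2 : keptOf (evens_alt r) = keepSpec true ls
    by_cases hf : pvFence l = true
    · constructor
      · simp only [segList, keepSpec, hf, if_true, Bool.not_false]
        rw [evens_alt_cons, hs]
        simp only [List.drop_succ_cons, List.singleton_append, keptOf_cons,
          List.filter_nil, List.nil_append]
        exact h2
      · simp only [segList, keepSpec, hf, if_true, Bool.not_true,
          List.drop_succ_cons, List.drop_zero]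
        exact ih.1
    · simp only [Bool.not_eq_true] at hf
      constructor
      · simp only [segList, keepSpec, hf, Bool.false_eq_true, if_false, Bool.false_or]
        rw [hs]
        simp only [consHead]
        rw [evens_alt_cons]
        simp only [List.singleton_append, keptOf_cons, List.filter_cons]
        by_cases hb : pvSkip l = true
        · simp only [hb, Bool.not_true, Bool.false_eq_true, if_false, if_true]
          exact h1
        · simp only [Bool.not_eq_true] at hb
          simp only [hb, Bool.not_false, if_true, Bool.false_eq_true, if_false,
            List.cons_append]
          rw [h1]
      · simp only [segList, keepSpec, hf, Bool.false_eq_true, if_false, Bool.true_or,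
          if_true]
        rw [hs]
        simp only [consHead, List.drop_succ_cons, List.drop_zero]
        exact h2

theorem kept_eq (lines : List String) :
    (lines.foldl (fun (st : Bool × List String) line =>
      if pvFence line then (!st.1, st.2)
      else if st.1 || pvSkip line then st
      else (st.1, st.2 ++ [line])) (false, ([] : List String))).2
    = ((evens_alt (fencesSplit_alt lines)).flatMap (fun seg => seg)).filter (fun ln => !pvSkip ln) := by
  rw [loopA_eq_keepSpec, fencesSplit_eq_segList]
  have h := (evens_keepSpec lines).1
  simp only [keptOf] at h
  rw [h]
  simp

-- ===== VERDICT (by name: the statement is the Claim_ definition above) =====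
theorem extract_description_from_markdown_py_spec : Claim_equal_extract_description_from_markdown_py := by
  unfold Claim_equal_extract_description_from_markdown_py
  intro content max_length _
  unfold Spec_extract_description_from_markdown_py
  simp only [extract_description_from_markdown_py, extract_description_from_markdown_py_alt,
    finalize_alt]
  rw [kept_eq]
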